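-- pv_equiv track=rewrite | github.com/momsspaghettti/yandex-algorithms-trainings-3.0 | 2/2.py | process_card_playing
-- ===== SOURCE A (Python) =====
-- from collections import deque
-- from typing import List
--
-- def process_card_playing(first_player_cards: List[int], second_player_cards: List[int]) -> str:
--     first = deque()
--     for f in first_player_cards:
--         first.append(f)
--     second = deque()
--     for s in second_player_cards:
--         second.append(s)
--
--     max_turn_number = 10 ** 6
--     turn_number = 1
--     while turn_number <= max_turn_number:
--         f_card = first.popleft()
--         s_card = second.popleft()
--
--         if f_card == 0 and s_card == 9 or f_card > s_card and (f_card != 9 or s_card != 0):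
--             first.append(f_card)
--             first.append(s_card)
--         elif s_card == 0 and f_card == 9 or s_card > f_card and (s_card != 9 or f_card != 0):
--             second.append(f_card)
--             second.append(s_card)
--         else:
--             return 'botva'
--
--         if len(first) == 0:
--             return f'second {turn_number}'
--
--         if len(second) == 0:
--             return f'first {turn_number}'
--
--         turn_number += 1
--
--     return 'botva'
-- ===== SOURCE B (Python) =====
-- from collections import deque
-- from typing import List
--
--
-- def _beats(a: int, b: int) -> bool:
--     # card a takes card b (0 beats 9; otherwise the higher card wins, except 9 loses to 0)
--     return (a == 0 and b == 9) or (a > b and not (a == 9 and b == 0))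
--
--
-- def process_card_playing(first_player_cards: List[int], second_player_cards: List[int]) -> str:
--     first = deque(first_player_cards)
--     second = deque(second_player_cards)
--     # Snapshot the deck state every k turns: a repeated state means the deterministic game
--     # loops forever ('botva'); k amortises the O(total cards) snapshot cost.
--     k = max(1, len(first) + len(second))
--     seen = set()
--     turn_number = 1
--     while turn_number <= 10 ** 6:
--         if turn_number % k == 0:
--             state = (tuple(first), tuple(second))
--             if state in seen:
--                 return 'botva'
--             seen.add(state)
--         f_card = first.popleft()
--         s_card = second.popleft()
--         if _beats(f_card, s_card):
--             first.append(f_card)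
--             first.append(s_card)
--             if not second:
--                 return f'first {turn_number}'
--         elif _beats(s_card, f_card):
--             second.append(f_card)
--             second.append(s_card)
--             if not first:
--                 return f'second {turn_number}'
--         else:
--             return 'botva'
--         turn_number += 1
--     return 'botva'
-- ===== Notes on version B (the rewrite author's own statement) =====
-- stated objective: alternative
-- what changed: B adds sound cycle detection to the simulation: every k turns (k = total number of cards) it snapshots the (deck1, deck2) state into a set and returns 'botva' as soon as a state repeats, since the deterministic game then loops forever; the 10^6-turn cap is kept as in A. On looping games it typically exits the loop long before the cap, but the snapshots cost extra on non-repeating games, so no uniform speed claim is made.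
import Mathlib
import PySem

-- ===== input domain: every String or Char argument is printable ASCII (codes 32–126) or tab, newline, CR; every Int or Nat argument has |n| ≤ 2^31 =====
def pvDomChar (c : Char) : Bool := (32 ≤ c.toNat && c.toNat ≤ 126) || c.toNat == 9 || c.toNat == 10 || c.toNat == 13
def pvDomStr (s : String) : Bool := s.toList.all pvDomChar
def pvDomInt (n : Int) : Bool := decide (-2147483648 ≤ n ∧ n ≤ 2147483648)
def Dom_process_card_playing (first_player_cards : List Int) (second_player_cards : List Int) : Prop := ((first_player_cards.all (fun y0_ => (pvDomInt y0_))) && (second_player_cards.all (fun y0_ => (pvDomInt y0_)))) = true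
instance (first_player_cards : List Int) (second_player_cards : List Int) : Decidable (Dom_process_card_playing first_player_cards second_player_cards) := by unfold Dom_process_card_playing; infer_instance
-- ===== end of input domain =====

-- B adds sound cycle detection to A's simulation: every k turns (k = total card count) the deck state
-- is snapshotted into a set, and a repeated state means the deterministic game loops forever ('botva');
-- the 10^6-turn cap is kept. Return values are identical on nonempty decks.

-- ===== PORT A =====
-- Python: while turn_number <= 10**6; fuel counts the remaining turns (10^6 - turn_number + 1).
-- The 'f_card :: ftl, s_card :: stl' pattern is the two poplefts; on an empty deque Python raises
-- IndexError (those inputs are excluded by Pre_), the port returns the junk value "".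
def pcpLoopA : Nat → Nat → List Int → List Int → String
  | 0, _, _, _ => "botva"
  | fuel+1, turn, first, second =>
    match first, second with
    | f_card :: ftl, s_card :: stl =>
      if (f_card = 0 ∧ s_card = 9) ∨ (f_card > s_card ∧ (f_card ≠ 9 ∨ s_card ≠ 0)) then
        -- first.append(f_card); first.append(s_card)
        let first := ftl ++ [f_card, s_card]
        if first = [] then "second " ++ toString turn
        else if stl = [] then "first " ++ toString turn
        else pcpLoopA fuel (turn+1) first stl
      else if (s_card = 0 ∧ f_card = 9) ∨ (s_card > f_card ∧ (s_card ≠ 9 ∨ f_card ≠ 0)) then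
        -- second.append(f_card); second.append(s_card)
        let second := stl ++ [f_card, s_card]
        if ftl = [] then "second " ++ toString turn
        else if second = [] then "first " ++ toString turn
        else pcpLoopA fuel (turn+1) ftl second
      else "botva"
    | _, _ => ""

def process_card_playing (first_player_cards : List Int) (second_player_cards : List Int) : String :=
  -- for f in first_player_cards: first.append(f)   (likewise for second)
  let first := first_player_cards.foldl (fun d x => d ++ [x]) []
  let second := second_player_cards.foldl (fun d x => d ++ [x]) []
  pcpLoopA 1000000 1 first second

-- ===== PORT B =====
def pcpBeats (a b : Int) : Bool :=
  (a == 0 && b == 9) || (a > b && !(a == 9 && b == 0))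

def pcpLoopB : Nat → Nat → Nat → PySem.Set (List Int × List Int) → List Int → List Int → String
  | 0, _, _, _, _, _ => "botva"
  | fuel+1, turn, k, seen, first, second =>
    -- if turn_number % k == 0: snapshot the state; a repeat means the game loops forever
    if (turn % k == 0) && PySem.Set.contains seen (first, second) then "botva"
    else
      let seen := if turn % k == 0 then PySem.Set.add seen (first, second) else seen
      match first, second with
      | f_card :: ftl, s_card :: stl =>
        if pcpBeats f_card s_card then
          let first := ftl ++ [f_card, s_card]
          if stl = [] then "first " ++ toString turn
          else pcpLoopB fuel (turn+1) k seen first stl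
        else if pcpBeats s_card f_card then
          let second := stl ++ [f_card, s_card]
          if ftl = [] then "second " ++ toString turn
          else pcpLoopB fuel (turn+1) k seen ftl second
        else "botva"
      | _, _ => ""  -- empty deque: Python raises IndexError (excluded by Pre_)

def process_card_playing_alt (first_player_cards : List Int) (second_player_cards : List Int) : String :=
  let k := max 1 (first_player_cards.length + second_player_cards.length)
  pcpLoopB 1000000 1 k PySem.Set.empty first_player_cards second_player_cards

-- ===== PRECONDITION & SPEC =====
-- Pre_ excludes exactly the inputs with an empty deck, on which both Pythons raise IndexError on popleft.
def Pre_process_card_playing (first_player_cards : List Int) (second_player_cards : List Int) : Prop :=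
  first_player_cards ≠ [] ∧ second_player_cards ≠ []
instance (first_player_cards : List Int) (second_player_cards : List Int) : Decidable (Pre_process_card_playing first_player_cards second_player_cards) := by unfold Pre_process_card_playing; infer_instance

def pvWitness_process_card_playing : List Int × List Int := ([1, 3], [2])

def Spec_process_card_playing (first_player_cards : List Int) (second_player_cards : List Int) (out : String) : Prop := out = process_card_playing_alt first_player_cards second_player_cards
instance (first_player_cards : List Int) (second_player_cards : List Int) (out : String) : Decidable (Spec_process_card_playing first_player_cards second_player_cards out) := by unfold Spec_process_card_playing; infer_instance

-- ===== CLAIM =====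
def Claim_equal_process_card_playing : Prop := ∀ (first_player_cards : List Int) (second_player_cards : List Int), Dom_process_card_playing first_player_cards second_player_cards → Pre_process_card_playing first_player_cards second_player_cards → Spec_process_card_playing first_player_cards second_player_cards (process_card_playing first_player_cards second_player_cards)

-- ===== LEMMAS AND PROOFS =====

-- One turn of the game, as a step function shared by the analyses of both loops.
inductive PcpRes where
  | cont : List Int × List Int → PcpRes
  | w1 : PcpRes
  | w2 : PcpRes
  | tie : PcpRes
deriving DecidableEq

def pcpStep (st : List Int × List Int) : PcpRes :=
  match st with
  | (f_card :: ftl, s_card :: stl) =>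
    if pcpBeats f_card s_card then
      if stl = [] then .w1 else .cont (ftl ++ [f_card, s_card], stl)
    else if pcpBeats s_card f_card then
      if ftl = [] then .w2 else .cont (ftl, stl ++ [f_card, s_card])
    else .tie
  | _ => .tie

-- reachability through continuing steps (PcpRC1: at least one step)
inductive PcpRC : List Int × List Int → List Int × List Int → Prop where
  | refl (x) : PcpRC x x
  | step {x y z} : pcpStep x = .cont y → PcpRC y z → PcpRC x z

def PcpRC1 (x z : List Int × List Int) : Prop := ∃ y, pcpStep x = .cont y ∧ PcpRC y z

theorem pcpRC_snoc {a x y : List Int × List Int} (h : PcpRC a x) (hs : pcpStep x = .cont y) : PcpRC a y := by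
  induction h with
  | refl => exact .step hs (.refl _)
  | step h1 _ ih => exact .step h1 (ih hs)

theorem pcpRC1_snoc {a x y : List Int × List Int} (h : PcpRC1 a x) (hs : pcpStep x = .cont y) : PcpRC1 a y := by
  obtain ⟨b, hb, hr⟩ := h
  exact ⟨b, hb, pcpRC_snoc hr hs⟩

theorem pcpCycle_next {x y : List Int × List Int} (h : PcpRC1 x x) (hs : pcpStep x = .cont y) : PcpRC1 y y := by
  obtain ⟨y', hy', hr⟩ := h
  have e : y = y' := by rw [hs] at hy'; injection hy'
  rw [← e] at hr
  cases hr with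
  | refl => exact ⟨_, hs, .refl _⟩
  | step h1 h2 => exact ⟨_, h1, pcpRC_snoc h2 hs⟩

theorem pcpCont_ne {st st' : List Int × List Int} (h : pcpStep st = .cont st') :
    st'.1 ≠ [] ∧ st'.2 ≠ [] := by
  obtain ⟨f, s⟩ := st
  match f, s with
  | [], s => simp [pcpStep] at h
  | f :: ftl, [] => simp [pcpStep] at h
  | f_card :: ftl, s_card :: stl =>
    simp only [pcpStep] at h
    split_ifs at h <;> injection h with e <;> subst e <;> simp_all

theorem pcpSrc_ne {st st' : List Int × List Int} (h : pcpStep st = .cont st') :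
    st.1 ≠ [] ∧ st.2 ≠ [] := by
  obtain ⟨f, s⟩ := st
  match f, s with
  | [], s => simp [pcpStep] at h
  | f :: ftl, [] => simp [pcpStep] at h
  | f_card :: ftl, s_card :: stl => simp

theorem pcpBeats_iff (a b : Int) :
    pcpBeats a b = true ↔ ((a = 0 ∧ b = 9) ∨ (a > b ∧ (a ≠ 9 ∨ b ≠ 0))) := by
  simp [pcpBeats]

-- Unfolding pcpLoopA through the step function, for nonempty decks.
theorem pcpLoopA_succ (fuel turn : Nat) (first second : List Int)
    (h1 : first ≠ []) (h2 : second ≠ []) :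
    pcpLoopA (fuel+1) turn first second =
      match pcpStep (first, second) with
      | .tie => "botva"
      | .w1 => "first " ++ toString turn
      | .w2 => "second " ++ toString turn
      | .cont st => pcpLoopA fuel (turn+1) st.1 st.2 := by
  match first, second with
  | f_card :: ftl, s_card :: stl =>
    simp only [pcpLoopA, pcpStep]
    split_ifs <;> simp_all [pcpBeats_iff] <;> omega

-- Unfolding pcpLoopB, for nonempty decks.
theorem pcpLoopB_succ (fuel turn k : Nat) (seen : PySem.Set (List Int × List Int))
    (first second : List Int) (h1 : first ≠ []) (h2 : second ≠ []) :
    pcpLoopB (fuel+1) turn k seen first second =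
      if ((turn % k == 0) && PySem.Set.contains seen (first, second)) = true then "botva"
      else
        match pcpStep (first, second) with
        | .tie => "botva"
        | .w1 => "first " ++ toString turn
        | .w2 => "second " ++ toString turn
        | .cont st =>
            pcpLoopB fuel (turn+1) k
              (if turn % k == 0 then PySem.Set.add seen (first, second) else seen) st.1 st.2 := by
  match first, second with
  | f_card :: ftl, s_card :: stl =>
    simp only [pcpLoopB, pcpStep]
    split_ifs <;> simp_all

-- A state on a cycle of continuing steps makes A exhaust its fuel: result "botva".
theorem pcpCycle_botva :
    ∀ (fuel : Nat) (s : List Int × List Int) (turn : Nat), PcpRC1 s s →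
      pcpLoopA fuel turn s.1 s.2 = "botva" := by
  intro fuel
  induction fuel with
  | zero => intro s turn _; rfl
  | succ fuel ih =>
    intro s turn h
    obtain ⟨y, hy, hr⟩ := h
    obtain ⟨h1, h2⟩ := pcpSrc_ne hy
    rw [pcpLoopA_succ fuel turn s.1 s.2 h1 h2]
    simp only [hy]
    exact ih y (turn+1) (pcpCycle_next ⟨y, hy, hr⟩ hy)

-- Main invariant: every snapshotted state reaches the current state through continuing steps.
theorem pcpLoop_eq (fuel : Nat) :
    ∀ (turn k : Nat) (seen : PySem.Set (List Int × List Int)) (first second : List Int),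
      first ≠ [] → second ≠ [] →
      (∀ x ∈ seen, PcpRC1 x (first, second)) →
      pcpLoopA fuel turn first second = pcpLoopB fuel turn k seen first second := by
  induction fuel with
  | zero => intro _ _ _ _ _ _ _ _; rfl
  | succ fuel ih =>
    intro turn k seen first second h1 h2 hinv
    rw [pcpLoopA_succ fuel turn first second h1 h2,
        pcpLoopB_succ fuel turn k seen first second h1 h2]
    by_cases hc : ((turn % k == 0) && PySem.Set.contains seen (first, second)) = true
    · rw [if_pos hc]
      have hmem : (first, second) ∈ seen :=
        (PySem.Set.contains_iff _ _).mp (Bool.and_elim_right hc)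
      have hb := pcpCycle_botva (fuel+1) (first, second) turn (hinv _ hmem)
      rw [pcpLoopA_succ fuel turn first second h1 h2] at hb
      exact hb
    · rw [if_neg hc]
      cases hstep : pcpStep (first, second) with
      | tie => rfl
      | w1 => rfl
      | w2 => rfl
      | cont st =>
        obtain ⟨hn1, hn2⟩ := pcpCont_ne hstep
        refine ih (turn+1) k _ st.1 st.2 hn1 hn2 ?_
        intro x hx
        have hx' : x ∈ seen ∨ x = (first, second) := by
          by_cases hk : turn % k == 0
          · simp only [hk, if_true] at hx
            exact (PySem.Set.mem_add _ _ _).mp hx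
          · simp only [hk] at hx
            exact Or.inl hx
        rcases hx' with hx' | hx'
        · exact pcpRC1_snoc (hinv x hx') (by simpa using hstep)
        · subst hx'; exact ⟨st, (by simpa using hstep), .refl _⟩

theorem pcpFoldl_append (l acc : List Int) :
    l.foldl (fun d x => d ++ [x]) acc = acc ++ l := by
  induction l generalizing acc with
  | nil => simp
  | cons a l ih => simp [List.foldl, ih]

-- ===== VERDICT =====
theorem process_card_playing_spec : Claim_equal_process_card_playing := by
  intro first second _ hpre
  unfold Spec_process_card_playing process_card_playing process_card_playing_alt
  simp only [pcpFoldl_append, List.nil_append]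
  exact pcpLoop_eq 1000000 1 _ PySem.Set.empty first second hpre.1 hpre.2 (by simp [PySem.Set.empty])
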